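-- pv_equiv track=rewrite | github.com/chichun2002/AOC2023 | day3/day3.py | search
-- ===== SOURCE A (Python) =====
-- def search(matrix, x, y):
--     list = []
--     for i in range(3):
--         for j in range(3):
--             intx = max(x-1+i, 0)
--             inty = max(y-1+j, 0)
--             intx = min(intx, len(matrix)-1)
--             inty = min(inty, len(matrix[0])-1)
--             list.append(matrix[intx][inty])
--
--     return list
--
-- matrix = []
-- ===== SOURCE B (Python) =====
-- def search(matrix, x, y):
--     h = len(matrix) - 1
--     w = len(matrix[0]) - 1
--
--     def clamp(v, hi):
--         return min(max(v, 0), hi)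
--
--     def go(k):
--         if k == 0:
--             return []
--         i, j = divmod(k - 1, 3)
--         cells = go(k - 1)
--         cells.append(matrix[clamp(x - 1 + i, h)][clamp(y - 1 + j, w)])
--         return cells
--
--     return go(9)
-- ===== Notes on version B (the rewrite author's own statement) =====
-- stated objective: alternative
-- what changed: B replaces A's nested 3x3 index loops by a recursion over a single flat cell index 0..8, recovering the row/column offsets with divmod and a shared clamp helper, building the list through the recursion.
import Mathlib
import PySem

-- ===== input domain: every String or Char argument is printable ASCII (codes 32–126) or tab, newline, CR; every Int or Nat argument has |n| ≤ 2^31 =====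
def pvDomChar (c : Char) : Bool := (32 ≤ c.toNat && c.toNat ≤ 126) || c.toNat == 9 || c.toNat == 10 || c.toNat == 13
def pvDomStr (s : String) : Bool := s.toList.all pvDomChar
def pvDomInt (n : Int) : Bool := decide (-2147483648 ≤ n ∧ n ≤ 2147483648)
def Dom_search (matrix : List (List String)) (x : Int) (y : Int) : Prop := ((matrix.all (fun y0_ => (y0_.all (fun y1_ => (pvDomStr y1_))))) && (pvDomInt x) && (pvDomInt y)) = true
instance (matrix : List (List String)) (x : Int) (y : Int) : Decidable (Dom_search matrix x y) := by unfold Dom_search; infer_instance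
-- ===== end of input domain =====

-- B recurses over a single flat cell index 0..8, recovering (i, j) with divmod and a
-- shared clamp helper, instead of A's nested 3x3 loops; same return value wherever A returns.

-- ===== PORT A =====
-- literal transliteration of A's nested loop; matrix[intx][inty] via pyGet? with .getD,
-- exact under Pre_search, which guarantees every access is a valid Python index
def search (matrix : List (List String)) (x : Int) (y : Int) : List String :=
  (PySem.List.pyRange 0 3 1).foldl (fun acc i =>
    (PySem.List.pyRange 0 3 1).foldl (fun acc2 j =>
      let intx := max (x - 1 + i) 0
      let inty := max (y - 1 + j) 0
      let intx := min intx (matrix.length - 1)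
      let inty := min inty (((PySem.List.pyGet? matrix 0).getD []).length - 1)
      acc2 ++ [(PySem.List.pyGet? ((PySem.List.pyGet? matrix intx).getD []) inty).getD ""]) acc) []

-- ===== PORT B =====
-- the clamp helper of Source B
def searchClamp (v hi : Int) : Int := min (max v 0) hi

-- the inner recursion go of Source B; the Int counter k ≥ 0 is carried as a Nat
-- (go(0) = [] base case; divmod(k-1, 3) via PySem.Int.floordiv/mod, exact for k-1 ≥ 0)
def searchGo (matrix : List (List String)) (x y h w : Int) : Nat → List String
  | 0 => []
  | k + 1 =>
    let i := PySem.Int.floordiv (k : Int) 3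
    let j := PySem.Int.mod (k : Int) 3
    let cells := searchGo matrix x y h w k
    cells ++ [(PySem.List.pyGet? ((PySem.List.pyGet? matrix (searchClamp (x - 1 + i) h)).getD []) (searchClamp (y - 1 + j) w)).getD ""]

def search_alt (matrix : List (List String)) (x : Int) (y : Int) : List String :=
  let h : Int := matrix.length - 1
  let w : Int := ((PySem.List.pyGet? matrix 0).getD []).length - 1
  searchGo matrix x y h w 9

-- ===== PRECONDITION & SPEC =====
-- Pre_ excludes exactly the inputs where Python A raises: the empty matrix (len(matrix[0])
-- is an IndexError) and matrices where some clamped access matrix[intx][inty] is out of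
-- range (a row shorter than the first row, or an empty first row giving index -1 into an
-- empty row); B raises on exactly the same inputs in Python.
def Pre_search (matrix : List (List String)) (x : Int) (y : Int) : Prop :=
  matrix ≠ [] ∧
  ∀ i ∈ ([0, 1, 2] : List Int), ∀ j ∈ ([0, 1, 2] : List Int),
    PySem.Raise.InRange
      ((matrix.getD (min (max (x - 1 + i) 0) (matrix.length - 1)).toNat []).length)
      (min (max (y - 1 + j) 0) ((matrix.headI).length - 1))
instance (matrix : List (List String)) (x : Int) (y : Int) : Decidable (Pre_search matrix x y) := by unfold Pre_search; infer_instance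

def pvWitness_search : List (List String) × Int × Int := ([["a", "b"], ["c", "d"]], 0, 0)

def Spec_search (matrix : List (List String)) (x : Int) (y : Int) (out : List String) : Prop := out = search_alt matrix x y
instance (matrix : List (List String)) (x : Int) (y : Int) (out : List String) : Decidable (Spec_search matrix x y out) := by unfold Spec_search; infer_instance

-- ===== CLAIM (what is proved, stated in full; the proofs are below) =====
def Claim_equal_search : Prop := ∀ (matrix : List (List String)) (x : Int) (y : Int), Dom_search matrix x y → Pre_search matrix x y → Spec_search matrix x y (search matrix x y)

-- ===== LEMMAS AND PROOFS =====
theorem pyRange03 : PySem.List.pyRange 0 3 1 = [0, 1, 2] := by decide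

-- ===== VERDICT (by name: the statement is the Claim_ definition above) =====
theorem search_spec : Claim_equal_search := by
  intro matrix x y _ _
  unfold Spec_search search search_alt
  simp [pyRange03, searchGo, searchClamp, List.foldl,
        PySem.Int.floordiv, PySem.Int.mod]
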